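-- pv_equiv track=rewrite | github.com/ethanc-ec/Wordle-Solver | Solver.py | bestguess
-- ===== SOURCE A (Python) =====
-- from collections import defaultdict
--
-- def bestguess(possible_words, guess_list):
--     """
--     Takes in a list of words, finds the best word based on sum of occurrences of each letter
--     Needs work, weights for various parts
--     """
--     if len(guess_list) == 1:
--         return set([guess_list])
--     charhashmap = defaultdict(lambda:0)
--     for word in possible_words:
--         for char in word:
--             charhashmap[char] += 1
--     curmax = 0
--     dupemax = 0
--     maxval = set()
--     maxwithdupes = set()
--     for word in guess_list:
--         word = word[:5]
--         summ = 0
--         for char in word: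
--             summ += charhashmap[char]
--         if len(set(list(word))) < len(word):
--             if summ > dupemax:
--                 dupemax = summ
--                 maxwithdupes = set([word])
--             elif summ == dupemax:
--                 maxwithdupes.add(word)
--         else:
--             if summ > curmax:
--                 curmax = summ
--                 maxval = set([word])
--             elif summ == curmax:
--                 maxval.add(word)
--     return maxval.union(maxwithdupes)
-- ===== SOURCE B (Python) =====
-- def bestguess(possible_words, guess_list):
--     """Score all guesses at once, then select the argmax sets per group (dupes / no dupes)."""
--     freq = {}
--     for word in possible_words:
--         for ch in word:
--             freq[ch] = freq.get(ch, 0) + 1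
--     scored = [(w[:5], sum(freq.get(c, 0) for c in w[:5])) for w in guess_list]
--     dupes = [p for p in scored if len(set(p[0])) < len(p[0])]
--     plains = [p for p in scored if len(set(p[0])) >= len(p[0])]
--     result = set()
--     for group in (plains, dupes):
--         if group:
--             m = max(s for _, s in group)
--             result |= {w for w, s in group if s == m}
--     return result
-- ===== Notes on version B (the rewrite author's own statement) =====
-- stated objective: alternative
-- what changed: A's single running-max loop with four pieces of mutable state is replaced by a score-all-then-select decomposition: map every guess to (truncated word, score), split into dupe/non-dupe lists, and for each non-empty group take max and the set of words attaining it.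
-- crash fix: On every guess_list of length 1 A raises TypeError (set([guess_list]) of an unhashable list); B returns the singleton set of the truncated best guess there. — e.g. on bestguess([], ["ab"]): A raises TypeError, B returns ["ab"]
import Mathlib
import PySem

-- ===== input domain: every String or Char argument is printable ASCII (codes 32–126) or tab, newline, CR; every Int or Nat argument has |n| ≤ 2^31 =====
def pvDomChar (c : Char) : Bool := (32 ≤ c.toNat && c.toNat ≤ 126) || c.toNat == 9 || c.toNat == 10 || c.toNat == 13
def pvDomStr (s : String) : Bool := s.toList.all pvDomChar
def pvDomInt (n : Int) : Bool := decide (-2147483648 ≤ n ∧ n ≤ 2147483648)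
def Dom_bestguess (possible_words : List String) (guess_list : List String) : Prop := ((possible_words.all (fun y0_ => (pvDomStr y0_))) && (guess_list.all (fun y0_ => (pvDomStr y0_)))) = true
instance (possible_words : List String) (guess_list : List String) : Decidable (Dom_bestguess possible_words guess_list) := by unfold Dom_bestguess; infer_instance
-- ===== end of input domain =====

-- B re-decomposes A's single running-max loop into score-all-then-select (map, two filters, max per group); same results, same cost.
-- ===== PORT A =====
-- Faithful port of A; defaultdict reads are getD 0 (the implicit key insertion on read never changes a value that is read).
-- When guess_list has length 1 the Python raises TypeError (set([guess_list]) of a list) — outside Pre_; the port returns [].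
def bestguess (possible_words : List String) (guess_list : List String) : List String :=
  if guess_list.length = 1 then []
  else
    let charhashmap : PySem.Dict Char Int :=
      possible_words.foldl (fun d word => word.toList.foldl (fun d c => d.modify c 0 (· + 1)) d) PySem.Dict.empty
    let st :=
      guess_list.foldl
        (fun (st : Int × Int × PySem.Set String × PySem.Set String) word =>
          let w := PySem.Str.slice word none (some 5)
          let summ := w.toList.foldl (fun s c => s + charhashmap.getD c 0) 0
          if (PySem.Set.ofList w.toList).length < w.toList.length then
            if summ > st.2.1 then (st.1, summ, st.2.2.1, PySem.Set.ofList [w])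
            else if summ = st.2.1 then (st.1, st.2.1, st.2.2.1, PySem.Set.add st.2.2.2 w)
            else st
          else
            if summ > st.1 then (summ, st.2.1, PySem.Set.ofList [w], st.2.2.2)
            else if summ = st.1 then (st.1, st.2.1, PySem.Set.add st.2.2.1 w, st.2.2.2)
            else st)
        ((0 : Int), (0 : Int), (PySem.Set.empty : PySem.Set String), (PySem.Set.empty : PySem.Set String))
    PySem.Set.union st.2.2.1 st.2.2.2

-- ===== PORT B =====
def bestguess_alt (possible_words : List String) (guess_list : List String) : List String :=
  let freq : PySem.Dict Char Int :=
    possible_words.foldl (fun d word => word.toList.foldl (fun d c => d.insert c (d.getD c 0 + 1)) d) PySem.Dict.empty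
  let scored : List (String × Int) :=
    guess_list.map (fun word =>
      let w := PySem.Str.slice word none (some 5)
      (w, (w.toList.map (fun c => freq.getD c 0)).sum))
  let dupes := scored.filter (fun p => decide ((PySem.Set.ofList p.1.toList).length < p.1.toList.length))
  let plains := scored.filter (fun p => decide (¬ (PySem.Set.ofList p.1.toList).length < p.1.toList.length))
  let result0 : PySem.Set String := PySem.Set.empty
  let result1 : PySem.Set String :=
    if plains.isEmpty then result0
    else
      match PySem.List.max? (plains.map Prod.snd) (fun s => s) with
      | none => result0   -- unreachable: plains is nonempty (totality guard only)
      | some m => PySem.Set.union result0 ((plains.filter (fun p => p.2 == m)).map Prod.fst)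
  let result2 : PySem.Set String :=
    if dupes.isEmpty then result1
    else
      match PySem.List.max? (dupes.map Prod.snd) (fun s => s) with
      | none => result1   -- unreachable: dupes is nonempty (totality guard only)
      | some m => PySem.Set.union result1 ((dupes.filter (fun p => p.2 == m)).map Prod.fst)
  result2

-- ===== PRECONDITION & SPEC =====
-- Pre_ excludes exactly len(guess_list) == 1, where A raises TypeError (set([guess_list]) of an unhashable list).
def Pre_bestguess (possible_words : List String) (guess_list : List String) : Prop := guess_list.length ≠ 1
instance (possible_words : List String) (guess_list : List String) : Decidable (Pre_bestguess possible_words guess_list) := by unfold Pre_bestguess; infer_instance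
def pvWitness_bestguess : List String × List String := (["abc"], ["ab", "cd"])

-- A raises TypeError on every guess_list of length 1; B returns the singleton best-guess set there.
def Raises_bestguess (possible_words : List String) (guess_list : List String) : Prop := guess_list.length = 1
instance (possible_words : List String) (guess_list : List String) : Decidable (Raises_bestguess possible_words guess_list) := by unfold Raises_bestguess; infer_instance
def pvRaiseWitness_bestguess : List String × List String := ([], ["ab"])
def pvRaiseWitnessOut_bestguess : List String := ["ab"]

def Spec_bestguess (possible_words : List String) (guess_list : List String) (out : List String) : Prop := out = bestguess_alt possible_words guess_list
instance (possible_words : List String) (guess_list : List String) (out : List String) : Decidable (Spec_bestguess possible_words guess_list out) := by unfold Spec_bestguess; infer_instance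

-- ===== CLAIM (what is proved, stated in full; the proofs are below) =====
def Claim_equal_bestguess : Prop := ∀ (possible_words : List String) (guess_list : List String), Dom_bestguess possible_words guess_list → Pre_bestguess possible_words guess_list → Spec_bestguess possible_words guess_list (bestguess possible_words guess_list)
def Claim_raises_bestguess : Prop := (∀ (possible_words : List String) (guess_list : List String), Dom_bestguess possible_words guess_list → Raises_bestguess possible_words guess_list → ¬ Pre_bestguess possible_words guess_list) ∧ (Dom_bestguess (pvRaiseWitness_bestguess.1) (pvRaiseWitness_bestguess.2) ∧ Raises_bestguess (pvRaiseWitness_bestguess.1) (pvRaiseWitness_bestguess.2) ∧ bestguess_alt (pvRaiseWitness_bestguess.1) (pvRaiseWitness_bestguess.2) = pvRaiseWitnessOut_bestguess)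

-- ===== LEMMAS AND PROOFS =====

-- proof-side helpers: the per-word key (truncated word, score), A's loop step, and closed forms
def bgDup (w : String) : Bool := decide ((PySem.Set.ofList w.toList).length < w.toList.length)

def bgKey (d : PySem.Dict Char Int) (word : String) : String × Int :=
  let w := PySem.Str.slice word none (some 5)
  (w, w.toList.foldl (fun s c => s + d.getD c 0) 0)

def bgStep (st : Int × Int × PySem.Set String × PySem.Set String) (p : String × Int) :
    Int × Int × PySem.Set String × PySem.Set String :=
  if (PySem.Set.ofList p.1.toList).length < p.1.toList.length then
    if p.2 > st.2.1 then (st.1, p.2, st.2.2.1, PySem.Set.ofList [p.1])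
    else if p.2 = st.2.1 then (st.1, st.2.1, st.2.2.1, PySem.Set.add st.2.2.2 p.1)
    else st
  else
    if p.2 > st.1 then (p.2, st.2.1, PySem.Set.ofList [p.1], st.2.2.2)
    else if p.2 = st.1 then (st.1, st.2.1, PySem.Set.add st.2.2.1 p.1, st.2.2.2)
    else st

def bgDictA (pw : List String) : PySem.Dict Char Int :=
  pw.foldl (fun d word => word.toList.foldl (fun d c => d.modify c 0 (· + 1)) d) PySem.Dict.empty

def bgDictB (pw : List String) : PySem.Dict Char Int :=
  pw.foldl (fun d word => word.toList.foldl (fun d c => d.insert c (d.getD c 0 + 1)) d) PySem.Dict.empty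

-- closed forms of A's running state: group maximum (from 0) and the set of group argmax words
def bgM (g : List (String × Int)) : Int := g.foldl (fun m p => max m p.2) 0

def bgSel (g : List (String × Int)) : PySem.Set String :=
  PySem.Set.ofList ((g.filter (fun p => p.2 == bgM g)).map Prod.fst)

theorem bgM_append (g : List (String × Int)) (p : String × Int) :
    bgM (g ++ [p]) = max (bgM g) p.2 := by
  simp [bgM, List.foldl_append]

theorem bg_le_bgM (g : List (String × Int)) : ∀ q ∈ g, q.2 ≤ bgM g :=
  (PySem.List.le_foldl_max_int g (fun p => p.2) 0).2

theorem bgSel_append (g : List (String × Int)) (p : String × Int) :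
    bgSel (g ++ [p]) =
      if p.2 > bgM g then PySem.Set.ofList [p.1]
      else if p.2 = bgM g then PySem.Set.add (bgSel g) p.1
      else bgSel g := by
  unfold bgSel
  rw [bgM_append]
  rcases lt_trichotomy (bgM g) p.2 with h | h | h
  · rw [if_pos h, max_eq_right h.le]
    have hnil : g.filter (fun p' => p'.2 == p.2) = [] := by
      rw [List.filter_eq_nil_iff]
      intro q hq
      simp only [beq_iff_eq]
      exact ne_of_lt (lt_of_le_of_lt (bg_le_bgM g q hq) h)
    simp [List.filter_append, hnil]
  · rw [if_neg (by omega), if_pos h.symm]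
    have hm : max (bgM g) p.2 = bgM g := by omega
    rw [hm]
    have hf : List.filter (fun q => q.2 == bgM g) [p] = [p] := by simp [← h]
    rw [List.filter_append, hf, List.map_append]
    simp [PySem.Set.ofList_append_singleton]
  · rw [if_neg (by omega), if_neg (by omega), max_eq_left h.le]
    have hf : List.filter (fun q => q.2 == bgM g) [p] = [] := by simp; omega
    simp [List.filter_append, hf]

theorem bg_loop (ps : List (String × Int)) :
    ps.foldl bgStep ((0 : Int), (0 : Int), (PySem.Set.empty : PySem.Set String), (PySem.Set.empty : PySem.Set String)) =
      (bgM (ps.filter (fun p => !bgDup p.1)), bgM (ps.filter (fun p => bgDup p.1)),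
       bgSel (ps.filter (fun p => !bgDup p.1)), bgSel (ps.filter (fun p => bgDup p.1))) := by
  induction ps using List.reverseRecOn with
  | nil => simp [bgM, bgSel, PySem.Set.empty]
  | append_singleton qs p ih =>
    rw [List.foldl_append, ih]
    by_cases hd : (PySem.Set.ofList p.1.toList).length < p.1.toList.length
    · have hb : bgDup p.1 = true := decide_eq_true hd
      simp only [List.filter_append, List.filter_cons, List.filter_nil, hb, Bool.not_true,
        Bool.false_eq_true, ite_false, ite_true, List.append_nil]
      rw [bgSel_append, bgM_append]
      simp only [List.foldl_cons, List.foldl_nil, bgStep, if_pos hd]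
      split_ifs <;> simp [Prod.ext_iff] <;> omega
    · have hb : bgDup p.1 = false := decide_eq_false hd
      simp only [List.filter_append, List.filter_cons, List.filter_nil, hb, Bool.not_false,
        Bool.false_eq_true, ite_false, ite_true, List.append_nil]
      rw [bgSel_append, bgM_append]
      simp only [List.foldl_cons, List.foldl_nil, bgStep, if_neg hd]
      split_ifs <;> simp [Prod.ext_iff] <;> omega

-- a fold of an inner char-fold over a list of words is the fold over the concatenated characters
theorem bg_flat_fold (g : PySem.Dict Char Int → Char → PySem.Dict Char Int) (ws : List String)
    (d : PySem.Dict Char Int) :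
    ws.foldl (fun d w => w.toList.foldl g d) d = (ws.flatMap (fun w => w.toList)).foldl g d := by
  induction ws generalizing d with
  | nil => rfl
  | cons w ws ih => simp [List.flatMap_cons, List.foldl_append, ih]

theorem bgDictA_eq_counter (pw : List String) :
    bgDictA pw = PySem.Dict.counter (pw.flatMap (fun w => w.toList)) := by
  unfold bgDictA
  rw [bg_flat_fold, PySem.Dict.counter_eq_foldl]

theorem bgDictB_eq_counter (pw : List String) :
    bgDictB pw = PySem.Dict.counter (pw.flatMap (fun w => w.toList)) := by
  unfold bgDictB
  rw [bg_flat_fold, PySem.Dict.foldl_insert_getD_add_one_eq_counter]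

theorem bgKey_snd_nonneg (xs : List Char) (word : String) :
    0 ≤ (bgKey (PySem.Dict.counter xs) word).2 := by
  simp only [bgKey, PySem.List.foldl_add, zero_add]
  apply List.sum_nonneg
  intro v hv
  rcases List.mem_map.mp hv with ⟨c, _, rfl⟩
  rw [PySem.Dict.getD_counter]
  exact Int.natCast_nonneg _

theorem bg_max?_eq (g : List (String × Int)) (hg : g ≠ []) (hpos : ∀ p ∈ g, 0 ≤ p.2) :
    PySem.List.max? (g.map Prod.snd) (fun s => s) = some (bgM g) := by
  rcases g with _ | ⟨q, t⟩
  · exact absurd rfl hg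
  · rw [List.map_cons, PySem.List.max?_id_cons]
    congr 1
    have h0 : max (0 : Int) q.2 = q.2 := max_eq_right (hpos q List.mem_cons_self)
    simp only [bgM, List.foldl_cons, h0, List.foldl_map]

theorem bg_union_empty (s : PySem.Set String) (hs : s.Nodup) :
    PySem.Set.union (PySem.Set.empty : PySem.Set String) s = s := by
  show PySem.Set.update [] s = s
  rw [PySem.Set.update_nil_left]
  exact PySem.Set.ofList_eq_self_of_nodup s hs

theorem bg_union_ofList (s : PySem.Set String) (l : List String) :
    PySem.Set.union s (PySem.Set.ofList l) = PySem.Set.union s l := by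
  show PySem.Set.update s (PySem.Set.ofList l) = PySem.Set.update s l
  rw [PySem.Set.update_eq_append_filter, PySem.Set.update_eq_append_filter, PySem.Set.ofList_ofList]

theorem bg_pick (g : List (String × Int)) (hpos : ∀ p ∈ g, 0 ≤ p.2) (acc : PySem.Set String) :
    (if g.isEmpty then acc
     else
       match PySem.List.max? (g.map Prod.snd) (fun s => s) with
       | none => acc
       | some m => PySem.Set.union acc ((g.filter (fun p => p.2 == m)).map Prod.fst))
      = PySem.Set.union acc (bgSel g) := by
  by_cases hg : g = []
  · subst hg
    simp [bgSel, PySem.Set.union, PySem.Set.update]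
  · rw [if_neg (by simpa [List.isEmpty_iff] using hg), bg_max?_eq g hg hpos]
    unfold bgSel
    rw [bg_union_ofList]

theorem bgKeyB_eq (d : PySem.Dict Char Int) :
    (fun word => (PySem.Str.slice word none (some 5),
      ((PySem.Str.slice word none (some 5)).toList.map (fun c => d.getD c 0)).sum))
      = bgKey d := by
  funext word
  simp only [bgKey, PySem.List.foldl_add, zero_add]

theorem bgFilterPlains (ps : List (String × Int)) :
    ps.filter (fun p => decide (¬ (PySem.Set.ofList p.1.toList).length < p.1.toList.length))
      = ps.filter (fun p => !bgDup p.1) := by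
  simp only [decide_not]
  rfl

theorem bgA_closed (pw gl : List String) (h : gl.length ≠ 1) :
    bestguess pw gl =
      PySem.Set.union
        (bgSel ((gl.map (bgKey (bgDictA pw))).filter (fun p => !bgDup p.1)))
        (bgSel ((gl.map (bgKey (bgDictA pw))).filter (fun p => bgDup p.1))) := by
  have hshow : bestguess pw gl =
      if gl.length = 1 then ([] : List String)
      else
        PySem.Set.union
          ((gl.foldl (fun st word => bgStep st (bgKey (bgDictA pw) word))
            ((0 : Int), (0 : Int), (PySem.Set.empty : PySem.Set String), (PySem.Set.empty : PySem.Set String))).2.2.1)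
          ((gl.foldl (fun st word => bgStep st (bgKey (bgDictA pw) word))
            ((0 : Int), (0 : Int), (PySem.Set.empty : PySem.Set String), (PySem.Set.empty : PySem.Set String))).2.2.2) := rfl
  rw [hshow, if_neg h, ← List.foldl_map, bg_loop]

theorem bgB_closed (pw gl : List String) :
    bestguess_alt pw gl =
      PySem.Set.union
        (bgSel ((gl.map (bgKey (bgDictB pw))).filter (fun p => !bgDup p.1)))
        (bgSel ((gl.map (bgKey (bgDictB pw))).filter (fun p => bgDup p.1))) := by
  have hpos : ∀ p ∈ gl.map (bgKey (bgDictB pw)), 0 ≤ p.2 := by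
    rw [bgDictB_eq_counter]
    intro p hp
    rcases List.mem_map.mp hp with ⟨word, _, rfl⟩
    exact bgKey_snd_nonneg _ word
  have hshow : bestguess_alt pw gl =
      (if ((gl.map (fun word => (PySem.Str.slice word none (some 5),
            ((PySem.Str.slice word none (some 5)).toList.map (fun c => (bgDictB pw).getD c 0)).sum))).filter
          (fun p => decide ((PySem.Set.ofList p.1.toList).length < p.1.toList.length))).isEmpty then
        (if ((gl.map (fun word => (PySem.Str.slice word none (some 5),
              ((PySem.Str.slice word none (some 5)).toList.map (fun c => (bgDictB pw).getD c 0)).sum))).filter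
            (fun p => decide (¬ (PySem.Set.ofList p.1.toList).length < p.1.toList.length))).isEmpty then
          (PySem.Set.empty : PySem.Set String)
        else
          match PySem.List.max? (((gl.map (fun word => (PySem.Str.slice word none (some 5),
              ((PySem.Str.slice word none (some 5)).toList.map (fun c => (bgDictB pw).getD c 0)).sum))).filter
            (fun p => decide (¬ (PySem.Set.ofList p.1.toList).length < p.1.toList.length))).map Prod.snd) (fun s => s) with
          | none => (PySem.Set.empty : PySem.Set String)
          | some m => PySem.Set.union (PySem.Set.empty : PySem.Set String)
              ((((gl.map (fun word => (PySem.Str.slice word none (some 5),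
                ((PySem.Str.slice word none (some 5)).toList.map (fun c => (bgDictB pw).getD c 0)).sum))).filter
                (fun p => decide (¬ (PySem.Set.ofList p.1.toList).length < p.1.toList.length))).filter
                  (fun p => p.2 == m)).map Prod.fst))
      else
        match PySem.List.max? (((gl.map (fun word => (PySem.Str.slice word none (some 5),
            ((PySem.Str.slice word none (some 5)).toList.map (fun c => (bgDictB pw).getD c 0)).sum))).filter
          (fun p => decide ((PySem.Set.ofList p.1.toList).length < p.1.toList.length))).map Prod.snd) (fun s => s) with
        | none =>
          (if ((gl.map (fun word => (PySem.Str.slice word none (some 5),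
                ((PySem.Str.slice word none (some 5)).toList.map (fun c => (bgDictB pw).getD c 0)).sum))).filter
              (fun p => decide (¬ (PySem.Set.ofList p.1.toList).length < p.1.toList.length))).isEmpty then
            (PySem.Set.empty : PySem.Set String)
          else
            match PySem.List.max? (((gl.map (fun word => (PySem.Str.slice word none (some 5),
                ((PySem.Str.slice word none (some 5)).toList.map (fun c => (bgDictB pw).getD c 0)).sum))).filter
              (fun p => decide (¬ (PySem.Set.ofList p.1.toList).length < p.1.toList.length))).map Prod.snd) (fun s => s) with
            | none => (PySem.Set.empty : PySem.Set String)
            | some m => PySem.Set.union (PySem.Set.empty : PySem.Set String)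
                ((((gl.map (fun word => (PySem.Str.slice word none (some 5),
                  ((PySem.Str.slice word none (some 5)).toList.map (fun c => (bgDictB pw).getD c 0)).sum))).filter
                  (fun p => decide (¬ (PySem.Set.ofList p.1.toList).length < p.1.toList.length))).filter
                    (fun p => p.2 == m)).map Prod.fst))
        | some m =>
          PySem.Set.union
            (if ((gl.map (fun word => (PySem.Str.slice word none (some 5),
                  ((PySem.Str.slice word none (some 5)).toList.map (fun c => (bgDictB pw).getD c 0)).sum))).filter
                (fun p => decide (¬ (PySem.Set.ofList p.1.toList).length < p.1.toList.length))).isEmpty then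
              (PySem.Set.empty : PySem.Set String)
            else
              match PySem.List.max? (((gl.map (fun word => (PySem.Str.slice word none (some 5),
                  ((PySem.Str.slice word none (some 5)).toList.map (fun c => (bgDictB pw).getD c 0)).sum))).filter
                (fun p => decide (¬ (PySem.Set.ofList p.1.toList).length < p.1.toList.length))).map Prod.snd) (fun s => s) with
              | none => (PySem.Set.empty : PySem.Set String)
              | some m' => PySem.Set.union (PySem.Set.empty : PySem.Set String)
                  ((((gl.map (fun word => (PySem.Str.slice word none (some 5),
                    ((PySem.Str.slice word none (some 5)).toList.map (fun c => (bgDictB pw).getD c 0)).sum))).filter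
                    (fun p => decide (¬ (PySem.Set.ofList p.1.toList).length < p.1.toList.length))).filter
                      (fun p => p.2 == m')).map Prod.fst))
            ((((gl.map (fun word => (PySem.Str.slice word none (some 5),
              ((PySem.Str.slice word none (some 5)).toList.map (fun c => (bgDictB pw).getD c 0)).sum))).filter
              (fun p => decide ((PySem.Set.ofList p.1.toList).length < p.1.toList.length))).filter
                (fun p => p.2 == m)).map Prod.fst)) := rfl
  rw [hshow, bgKeyB_eq, bgFilterPlains]
  rw [bg_pick _ (fun p hp => hpos p (List.mem_of_mem_filter hp)),
      bg_pick _ (fun p hp => hpos p (List.mem_of_mem_filter hp))]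
  have hnodup : (bgSel ((gl.map (bgKey (bgDictB pw))).filter (fun p => !bgDup p.1))).Nodup :=
    PySem.Set.nodup_ofList _
  rw [bg_union_empty _ hnodup]
  rfl

theorem bg_main (pw gl : List String) (h : gl.length ≠ 1) :
    bestguess pw gl = bestguess_alt pw gl := by
  rw [bgA_closed pw gl h, bgB_closed pw gl, bgDictA_eq_counter, bgDictB_eq_counter]

-- ===== VERDICT (by name: the statement is the Claim_ definition above) =====
theorem bestguess_spec : Claim_equal_bestguess := by
  intro pw gl _ hpre
  exact bg_main pw gl hpre

@[simp] theorem bestguess_raises : Claim_raises_bestguess := by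
  unfold Claim_raises_bestguess
  exact ⟨fun pw gl _ h hp => hp h, by decide⟩
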